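-- pv_equiv track=rewrite | github.com/antichloride/climcalc-core | scripts/copy_test_case_from_excel/utils.py | insert_in_section
-- ===== SOURCE A (Python) =====
-- def insert_in_section(lines, lines_to_insert, start_identyfier, end_identifiyer):
--     start_line=None
--     end_line=None
--     for i,line in enumerate(lines):
--         if start_identyfier in line:
--             start_line=i
--         if end_identifiyer in line:
--             end_line=i
--
--     if start_line == None or end_line == None:
--         error_msg = ""
--         if start_line == None:
--             error_msg = f"{start_identyfier} was not found."
--         if end_line == None:
--             error_msg = f"{error_msg} {end_identifiyer} was not found."
--         raise Exception(error_msg)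
--
--     return lines[:start_line+1] + lines_to_insert + lines[end_line:]
-- ===== SOURCE B (Python) =====
-- def insert_in_section(lines, lines_to_insert, start_identyfier, end_identifiyer):
--     found_start = _split_at_last(lines, start_identyfier)
--     found_end = _split_at_last(lines, end_identifiyer)
--
--     if found_start is None or found_end is None:
--         error_msg = ""
--         if found_start is None:
--             error_msg = f"{start_identyfier} was not found."
--         if found_end is None:
--             error_msg = f"{error_msg} {end_identifiyer} was not found."
--         raise Exception(error_msg)
--
--     before, start_match, _ = found_start
--     _, end_match, after = found_end
--     return before + [start_match] + lines_to_insert + [end_match] + after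
--
--
-- def _split_at_last(lines, ident):
--     """Zipper split at the LAST line containing ident: pop lines off the end,
--     accumulating the popped tail, until a match is found.
--     Returns (lines before the match, the matching line, lines after it), or None."""
--     rest = list(lines)
--     popped = []
--     while rest:
--         last = rest.pop()
--         if ident in last:
--             return rest, last, popped[::-1]
--         popped.append(last)
--     return None
-- ===== Notes on version B (the rewrite author's own statement) =====
-- stated objective: alternative
-- what changed: Replaces A's indexed algorithm (enumerate to record the last marker indices, then slice lines[:start+1]/lines[end:]) with an index-free zipper: a helper pops lines off the end into an accumulator until the last marker line appears, returning (before, match, after) triples that are concatenated directly, so no enumerate, indices or slicing remain.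
import Mathlib
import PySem

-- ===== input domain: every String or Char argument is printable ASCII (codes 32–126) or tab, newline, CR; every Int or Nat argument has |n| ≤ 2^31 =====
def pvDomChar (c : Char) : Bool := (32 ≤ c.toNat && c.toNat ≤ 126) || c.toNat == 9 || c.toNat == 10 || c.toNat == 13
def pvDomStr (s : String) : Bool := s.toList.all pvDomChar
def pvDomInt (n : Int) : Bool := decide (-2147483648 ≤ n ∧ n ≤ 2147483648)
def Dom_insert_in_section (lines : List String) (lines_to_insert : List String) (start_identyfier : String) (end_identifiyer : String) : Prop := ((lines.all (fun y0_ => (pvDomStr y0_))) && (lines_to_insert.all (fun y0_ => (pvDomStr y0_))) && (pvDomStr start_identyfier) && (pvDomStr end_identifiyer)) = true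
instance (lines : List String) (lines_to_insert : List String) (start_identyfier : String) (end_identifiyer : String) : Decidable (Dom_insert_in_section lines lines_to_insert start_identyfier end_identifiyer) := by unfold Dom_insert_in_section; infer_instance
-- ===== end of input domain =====

-- B replaces A's index bookkeeping entirely: a zipper helper pops lines off the end into an
-- accumulator until the last marker line appears, returning (before, match, after) directly,
-- so no enumerate, no indices and no slicing remain (objective: alternative decomposition).
-- Both Pythons raise Exception when a marker is missing; those inputs are outside Pre_.

-- ===== PORT A =====
-- one loop step of A's 'for i, line in enumerate(lines)': the two independent in-order if-updates
def pvStepA (s e : String) (st : Option Int × Option Int) (p : Int × String) : Option Int × Option Int :=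
  let st1 := if PySem.Str.isIn s p.2 then (some p.1, st.2) else st
  if PySem.Str.isIn e p.2 then (st1.1, some p.1) else st1

def insert_in_section (lines : List String) (lines_to_insert : List String) (start_identyfier : String) (end_identifiyer : String) : List String :=
  let r := (PySem.List.enumerate lines 0).foldl (pvStepA start_identyfier end_identifiyer) (none, none)
  match r with
  | (some sl, some el) =>
      PySem.List.slice lines none (some (sl + 1)) ++ lines_to_insert ++ PySem.List.slice lines (some el) none
  | _ => []   -- Python raises Exception here; excluded by Pre_

-- ===== PORT B =====
-- Source B's while-pop loop of _split_at_last: 'rest' is popped from its end, so the loop walks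
-- lines.reverse; 'popped.append(last)' is popped ++ [last]; 'popped[::-1]' is popped.reverse.
def pvSplitLoop (ident : String) : List String → List String → Option (List String × String × List String)
  | [], _ => none
  | last :: restRev, popped =>
      if PySem.Str.isIn ident last then some (restRev.reverse, last, popped.reverse)
      else pvSplitLoop ident restRev (popped ++ [last])

def pvSplitAtLast (lines : List String) (ident : String) : Option (List String × String × List String) :=
  pvSplitLoop ident lines.reverse []

def insert_in_section_alt (lines : List String) (lines_to_insert : List String) (start_identyfier : String) (end_identifiyer : String) : List String :=
  match pvSplitAtLast lines start_identyfier with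
  | none => []   -- Python raises Exception here; excluded by Pre_
  | some (before, start_match, _) =>
      match pvSplitAtLast lines end_identifiyer with
      | none => []   -- Python raises Exception here; excluded by Pre_
      | some (_, end_match, after) =>
          before ++ [start_match] ++ lines_to_insert ++ [end_match] ++ after

-- ===== PRECONDITION & SPEC =====
-- A raises Exception iff some marker occurs in no line; Pre_ admits exactly the inputs where both markers occur.
def Pre_insert_in_section (lines : List String) (lines_to_insert : List String) (start_identyfier : String) (end_identifiyer : String) : Prop :=
  (∃ l ∈ lines, PySem.Str.isIn start_identyfier l = true) ∧ (∃ l ∈ lines, PySem.Str.isIn end_identifiyer l = true)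
instance (lines : List String) (lines_to_insert : List String) (start_identyfier : String) (end_identifiyer : String) : Decidable (Pre_insert_in_section lines lines_to_insert start_identyfier end_identifiyer) := by unfold Pre_insert_in_section; infer_instance

def pvWitness_insert_in_section : List String × List String × String × String :=
  (["begin A", "x", "end A"], ["new"], "begin", "end")

def Spec_insert_in_section (lines : List String) (lines_to_insert : List String) (start_identyfier : String) (end_identifiyer : String) (out : List String) : Prop := out = insert_in_section_alt lines lines_to_insert start_identyfier end_identifiyer
instance (lines : List String) (lines_to_insert : List String) (start_identyfier : String) (end_identifiyer : String) (out : List String) : Decidable (Spec_insert_in_section lines lines_to_insert start_identyfier end_identifiyer out) := by unfold Spec_insert_in_section; infer_instance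

-- ===== CLAIM (what is proved, stated in full; the proofs are below) =====
def Claim_equal_insert_in_section : Prop := ∀ (lines : List String) (lines_to_insert : List String) (start_identyfier : String) (end_identifiyer : String), Dom_insert_in_section lines lines_to_insert start_identyfier end_identifiyer → Pre_insert_in_section lines lines_to_insert start_identyfier end_identifiyer → Spec_insert_in_section lines lines_to_insert start_identyfier end_identifiyer (insert_in_section lines lines_to_insert start_identyfier end_identifiyer)

-- ===== LEMMAS AND PROOFS =====

-- proof-side characterisation: index of the LAST line containing ident
def pvLastIdx (ident : String) : List String → Option Nat
  | [] => none
  | l :: ls =>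
      match pvLastIdx ident ls with
      | some j => some (j + 1)
      | none => if PySem.Str.isIn ident l then some 0 else none

theorem pvLastIdx_snoc (ident x : String) (xs : List String) :
    pvLastIdx ident (xs ++ [x]) =
      if PySem.Str.isIn ident x then some xs.length else pvLastIdx ident xs := by
  induction xs with
  | nil =>
      by_cases h : PySem.Chars.isIn ident.toList x.toList = true <;>
        simp [pvLastIdx, PySem.Str.isIn_eq, h]
  | cons l ls ih =>
      simp only [List.cons_append, pvLastIdx, ih, PySem.Str.isIn_eq]
      by_cases h : PySem.Chars.isIn ident.toList x.toList = true <;>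
        cases pvLastIdx ident ls <;> simp [h]

theorem pvLastIdx_lt (ident : String) (xs : List String) (i : Nat)
    (h : pvLastIdx ident xs = some i) : i < xs.length := by
  induction xs generalizing i with
  | nil => simp [pvLastIdx] at h
  | cons l ls ih =>
      simp only [pvLastIdx] at h
      cases hl : pvLastIdx ident ls with
      | some j =>
          rw [hl] at h
          simp only [Option.some.injEq] at h
          have := ih j hl
          simp only [List.length_cons]
          omega
      | none =>
          rw [hl] at h
          split_ifs at h
          simp only [Option.some.injEq] at h
          simp only [List.length_cons]
          omega

theorem pvLastIdx_ne_none (ident : String) (xs : List String)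
    (h : ∃ l ∈ xs, PySem.Str.isIn ident l = true) : pvLastIdx ident xs ≠ none := by
  induction xs with
  | nil => simp at h
  | cons l ls ih =>
      simp only [pvLastIdx]
      cases hl : pvLastIdx ident ls with
      | some j => simp
      | none =>
          obtain ⟨m, hm, hin⟩ := h
          rcases List.mem_cons.mp hm with rfl | hm'
          · simp [PySem.Str.isIn_eq] at hin
            simp [PySem.Str.isIn_eq, hin]
          · exact absurd hl (ih ⟨m, hm', hin⟩)

-- A's loop step, componentwise
theorem pvStepA_eq (s e : String) (st : Option Int × Option Int) (p : Int × String) :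
    pvStepA s e st p =
      ((if PySem.Str.isIn s p.2 then some p.1 else st.1),
       (if PySem.Str.isIn e p.2 then some p.1 else st.2)) := by
  unfold pvStepA
  simp only [PySem.Str.isIn_eq]
  by_cases hs : PySem.Chars.isIn s.toList p.2.toList = true <;>
    by_cases he : PySem.Chars.isIn e.toList p.2.toList = true <;> simp [hs, he]

-- A's single forward fold computes the two last-occurrence indices
theorem foldA_eq_lastIdx (lines : List String) (s e : String) :
    (PySem.List.enumerate lines 0).foldl (pvStepA s e) (none, none) =
      ((pvLastIdx s lines).map (fun k => (k : Int)),
       (pvLastIdx e lines).map (fun k => (k : Int))) := by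
  induction lines using List.reverseRecOn with
  | nil => rfl
  | append_singleton xs x ih =>
      have hen : PySem.List.enumerate (xs ++ [x]) 0 =
          PySem.List.enumerate xs 0 ++ [((xs.length : Int), x)] := by
        rw [PySem.List.enumerate_append]; simp [PySem.List.enumerate]
      rw [hen, List.foldl_append, ih]
      simp only [List.foldl_cons, List.foldl_nil, pvStepA_eq, pvLastIdx_snoc]
      simp only [PySem.Str.isIn_eq]
      by_cases hs : PySem.Chars.isIn s.toList x.toList = true <;>
        by_cases he : PySem.Chars.isIn e.toList x.toList = true <;> simp [hs, he]

-- B's pop loop computes the zipper at the last occurrence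
theorem pvSplitLoop_eq_lastIdx (ident : String) (xs acc : List String) :
    pvSplitLoop ident xs.reverse acc =
      (pvLastIdx ident xs).map
        (fun i => (xs.take i, xs.getD i "", xs.drop (i + 1) ++ acc.reverse)) := by
  induction xs using List.reverseRecOn generalizing acc with
  | nil => rfl
  | append_singleton ys x ih =>
      rw [List.reverse_append]
      simp only [List.reverse_singleton, List.singleton_append, pvSplitLoop, pvLastIdx_snoc,
        PySem.Str.isIn_eq]
      by_cases h : PySem.Chars.isIn ident.toList x.toList = true
      · simp [h, List.getD, List.drop_eq_nil_of_le]
      · rw [if_neg h, if_neg h, ih (acc ++ [x])]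
        cases hl : pvLastIdx ident ys with
        | none => simp
        | some i =>
            have hi : i < ys.length := pvLastIdx_lt ident ys i hl
            simp only [Option.map_some]
            congr 1
            refine Prod.ext ?_ (Prod.ext ?_ ?_)
            · simp [List.take_append_of_le_length hi.le]
            · simp [List.getD, List.getElem?_append_left hi]
            · simp [List.drop_append_of_le_length hi]

-- ===== VERDICT (by name: the statement is the Claim_ definition above) =====
theorem insert_in_section_spec : Claim_equal_insert_in_section := by
  intro lines lines_to_insert s e _ hpre
  unfold Spec_insert_in_section insert_in_section insert_in_section_alt pvSplitAtLast
  rw [foldA_eq_lastIdx, pvSplitLoop_eq_lastIdx, pvSplitLoop_eq_lastIdx]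
  cases hs : pvLastIdx s lines with
  | none => exact absurd hs (pvLastIdx_ne_none s lines hpre.1)
  | some i =>
    cases he : pvLastIdx e lines with
    | none => exact absurd he (pvLastIdx_ne_none e lines hpre.2)
    | some j =>
      have hi : i < lines.length := pvLastIdx_lt s lines i hs
      have hj : j < lines.length := pvLastIdx_lt e lines j he
      simp only [Option.map_some, Option.pure_def, Option.bind_eq_bind, Option.bind_some]
      have h1 : ((i : Int) + 1) = ((i + 1 : Nat) : Int) := by push_cast; ring
      rw [h1, PySem.List.slice_to_natCast, PySem.List.slice_from_natCast]
      rw [List.take_add_one, List.drop_eq_getElem_cons hj]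
      simp [List.getElem?_eq_getElem hi, List.getD_eq_getElem?_getD,
        List.getElem?_eq_getElem hj]
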